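-- pv_equiv track=rewrite | github.com/maeeri/tira | Wk2/onechar.py | count
-- ===== SOURCE A (Python) =====
-- def count(s):
--     temp = ''
--     counter = 0
--     for i in range(0, len(s)):
--         if s[i] != s[i-1]:
--             counter += sum([i for i in range(len(temp)+1)])
--             temp = s[i]
--         else:
--             temp += s[i]
--     counter += sum([i for i in range(len(temp)+1)])
--     return counter
-- ===== SOURCE B (Python) =====
-- def count(s):
--     total = 0
--     run = 0
--     prev = None
--     for c in s:
--         if c == prev:
--             run += 1
--         else:
--             run = 1
--         total += run
--         prev = c
--     return total
-- ===== Notes on version B (the rewrite author's own statement) =====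
-- stated objective: faster
-- what changed: Replaces A's run-string building (temp accumulation) and per-run sum over a materialised range list with a single incremental pass that adds the current run length at each character.
import Mathlib
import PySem

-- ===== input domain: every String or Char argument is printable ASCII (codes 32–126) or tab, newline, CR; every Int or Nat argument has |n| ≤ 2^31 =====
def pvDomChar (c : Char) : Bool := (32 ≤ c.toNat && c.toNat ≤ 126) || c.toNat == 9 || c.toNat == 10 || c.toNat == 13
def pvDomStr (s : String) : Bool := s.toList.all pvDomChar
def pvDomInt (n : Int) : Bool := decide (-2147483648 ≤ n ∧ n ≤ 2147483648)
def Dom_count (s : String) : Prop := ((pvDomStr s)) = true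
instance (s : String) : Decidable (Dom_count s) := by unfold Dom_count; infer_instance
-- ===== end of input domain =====

-- B replaces A's per-run temp-string building and range-list summation with one incremental
-- run-length pass (asymptotically faster on long equal-character runs).


-- ===== PORT A =====
-- sum([i for i in range(n)])
def triSum (n : Int) : Int := (PySem.List.pyRange 0 n 1).foldl (· + ·) 0

-- the loop body of A; temp is kept as List Char (exact for Python string append/len)
def stepA (s : String) (st : List Char × Int) (i : Int) : List Char × Int :=
  match PySem.Str.pyGet? s i, PySem.Str.pyGet? s (i - 1) with
  | some a, some b =>
      if a ≠ b then ([a], st.2 + triSum ((st.1.length : Int) + 1))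
      else (st.1 ++ [a], st.2)
  | _, _ => st

def count (s : String) : Int :=
  let st := (PySem.List.pyRange 0 (PySem.Str.len s) 1).foldl (stepA s) ([], 0)
  st.2 + triSum ((st.1.length : Int) + 1)

-- ===== PORT B =====
-- the loop body of B: state (total, run, prev)
def stepB (st : Int × Int × Option Char) (c : Char) : Int × Int × Option Char :=
  let run : Int := if some c = st.2.2 then st.2.1 + 1 else 1
  (st.1 + run, run, some c)

def count_alt (s : String) : Int :=
  (s.toList.foldl stepB (0, 0, none)).1

-- ===== PRECONDITION & SPEC =====
def Spec_count (s : String) (out : Int) : Prop := out = count_alt s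
instance (s : String) (out : Int) : Decidable (Spec_count s out) := by unfold Spec_count; infer_instance

-- ===== CLAIM (what is proved, stated in full; the proofs are below) =====
def Claim_equal_count : Prop := ∀ (s : String), Dom_count s → Spec_count s (count s)

-- ===== LEMMAS AND PROOFS =====

-- A's loop for i ≥ 1, rephrased structurally over the remaining characters, carrying the previous char
def aLoop : List Char → Char → (List Char × Int) → (List Char × Int)
  | [], _, st => st
  | c :: rest, prev, st =>
      if c ≠ prev then aLoop rest c ([c], st.2 + triSum ((st.1.length : Int) + 1))
      else aLoop rest c (st.1 ++ [c], st.2)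

theorem triSum_succ (n : Int) (h : 0 ≤ n) : triSum (n + 1) = triSum n + n := by
  unfold triSum
  rw [PySem.List.pyRange_one_succ_right h, List.foldl_append]
  rfl

theorem triSum_one : triSum 1 = 0 := by
  have h := triSum_succ 0 le_rfl
  have h0 : triSum 0 = 0 := by
    unfold triSum
    rw [PySem.List.pyRange_one_eq_nil le_rfl]
    rfl
  simpa [h0] using h

theorem triSum_two : triSum 2 = 1 := by
  have h := triSum_succ 1 (by norm_num)
  norm_num [triSum_one] at h
  exact h

theorem stepB_eq_of_eq (t r : Int) (c : Char) :
    stepB (t, r, some c) c = (t + (r + 1), r + 1, some c) := by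
  simp [stepB]

theorem stepB_eq_of_ne (t r : Int) (p : Option Char) (c : Char) (h : some c ≠ p) :
    stepB (t, r, p) c = (t + 1, 1, some c) := by
  simp [stepB, h]

theorem aLoop_cons_eq (c : Char) (rest temp : List Char) (cnt : Int) :
    aLoop (c :: rest) c (temp, cnt) = aLoop rest c (temp ++ [c], cnt) := by
  simp [aLoop]

theorem aLoop_cons_ne (c prev : Char) (rest temp : List Char) (cnt : Int)
    (h : c ≠ prev) :
    aLoop (c :: rest) prev (temp, cnt) = aLoop rest c ([c], cnt + triSum ((temp.length : Int) + 1)) := by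
  simp [aLoop, h]

-- main invariant: A's residual loop plus its final triangular flush equals B's residual fold
theorem main_inv (rest : List Char) : ∀ (prev : Char) (temp : List Char) (cnt : Int),
    (aLoop rest prev (temp, cnt)).2 + triSum (((aLoop rest prev (temp, cnt)).1.length : Int) + 1)
    = (rest.foldl stepB (cnt + triSum ((temp.length : Int) + 1), (temp.length : Int), some prev)).1 := by
  induction rest with
  | nil => intro prev temp cnt; rfl
  | cons c rest ih =>
    intro prev temp cnt
    by_cases hc : c = prev
    · subst hc
      rw [aLoop_cons_eq, List.foldl_cons, stepB_eq_of_eq]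
      have hlen : ((temp ++ [c]).length : Int) = (temp.length : Int) + 1 := by simp
      have := ih c (temp ++ [c]) cnt
      rw [hlen] at this
      rw [this]
      rw [triSum_succ ((temp.length : Int) + 1) (by positivity)]
      ring_nf
    · rw [aLoop_cons_ne c prev rest temp cnt hc, List.foldl_cons,
        stepB_eq_of_ne _ _ _ _ (by simpa using hc)]
      have := ih c [c] (cnt + triSum ((temp.length : Int) + 1))
      simpa [triSum_two] using this

-- A's index loop from k ≥ 1 equals aLoop on the dropped suffix with prev = s[k-1]
theorem idx_loop (s : String) : ∀ (m k : Nat) (st : List Char × Int),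
    k + m = s.toList.length → 1 ≤ k →
    (PySem.List.pyRange (k : Int) (PySem.Str.len s) 1).foldl (stepA s) st
    = aLoop (s.toList.drop k) (s.toList.getD (k - 1) ' ') st := by
  have hlenInt : PySem.Str.len s = (s.toList.length : Int) := by simp
  intro m
  induction m with
  | zero =>
    intro k st hk _
    rw [PySem.List.pyRange_one_eq_nil
      (by rw [hlenInt]; exact_mod_cast (show s.toList.length ≤ k by omega))]
    rw [List.drop_of_length_le (by omega)]
    rfl
  | succ m ih =>
    intro k st hk hk1
    obtain ⟨t, cn⟩ := st
    have hklt : k < s.toList.length := by omega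
    have hk1lt : k - 1 < s.toList.length := by omega
    rw [PySem.List.pyRange_one_cons (by rw [hlenInt]; exact_mod_cast hklt)]
    rw [List.foldl_cons]
    have hdrop : s.toList.drop k = s.toList[k] :: s.toList.drop (k + 1) :=
      List.drop_eq_getElem_cons hklt
    have hprev : s.toList.getD (k - 1) ' ' = s.toList[k - 1] :=
      List.getD_eq_getElem _ _ hk1lt
    have hstep : stepA s (t, cn) (k : Int)
        = if s.toList[k] ≠ s.toList[k - 1]
          then ([s.toList[k]], cn + triSum ((t.length : Int) + 1))
          else (t ++ [s.toList[k]], cn) := by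
      unfold stepA
      have h1 : PySem.Str.pyGet? s (k : Int) = some s.toList[k] := by
        simp [List.getElem?_eq_getElem hklt]
      have h2 : PySem.Str.pyGet? s ((k : Int) - 1) = some s.toList[k - 1] := by
        have hcast : (k : Int) - 1 = ((k - 1 : Nat) : Int) := by omega
        rw [hcast]
        simp [List.getElem?_eq_getElem hk1lt]
      rw [h1, h2]
    rw [hstep, hdrop, hprev]
    have hcast : (k : Int) + 1 = ((k + 1 : Nat) : Int) := by omega
    have hgd : s.toList.getD (k + 1 - 1) ' ' = s.toList[k] :=
      List.getD_eq_getElem _ _ hklt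
    by_cases hne : s.toList[k] = s.toList[k - 1]
    · rw [if_neg (by simp [hne]), ← hne, aLoop_cons_eq]
      rw [hcast, ih (k + 1) _ (by omega) (by omega), hgd]
    · rw [if_pos hne, aLoop_cons_ne _ _ _ _ _ hne]
      rw [hcast, ih (k + 1) _ (by omega) (by omega), hgd]

-- ===== VERDICT (by name: the statement is the Claim_ definition above) =====
theorem count_spec : Claim_equal_count := by
  intro s _
  unfold Spec_count
  have hlenInt : PySem.Str.len s = (s.toList.length : Int) := by simp
  cases hs : s.toList with
  | nil =>
    unfold count count_alt
    rw [hlenInt, hs]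
    rw [PySem.List.pyRange_one_eq_nil (by norm_num)]
    simp [triSum_one]
  | cons c0 rest =>
    have hlen : s.toList.length = rest.length + 1 := by rw [hs]; rfl
    unfold count count_alt
    rw [PySem.List.pyRange_one_cons
      (by rw [hlenInt, hlen]; exact_mod_cast Nat.succ_pos rest.length)]
    rw [List.foldl_cons]
    -- the i = 0 step yields ([c0], 0) in both branches (s[-1] is the last character)
    have hstep0 : stepA s ([], 0) 0 = ([c0], 0) := by
      unfold stepA
      have h1 : PySem.Str.pyGet? s 0 = some c0 := by simp [hs]
      obtain ⟨b, hb⟩ : ∃ b, (c0 :: rest).getLast? = some b := by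
        cases hg : (c0 :: rest).getLast? with
        | none => simp at hg
        | some b => exact ⟨b, rfl⟩
      have h2 : PySem.Str.pyGet? s ((0 : Int) - 1) = some b := by
        have hm : (0 : Int) - 1 = -1 := by norm_num
        rw [hm]
        simp only [PySem.Str.pyGet?_eq, PySem.Chars.pyGet?_eq_listPyGet?]
        rw [PySem.List.pyGet?_neg_one, hs, hb]
      rw [h1, h2]
      by_cases h : c0 = b
      · simp [h]
      · simp [h, triSum_one]
    rw [hstep0]
    have h01 : (0 : Int) + 1 = ((1 : Nat) : Int) := by norm_num
    rw [h01, idx_loop s rest.length 1 ([c0], 0) (by omega) le_rfl]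
    have hd : s.toList.drop 1 = rest := by rw [hs]; rfl
    have hg : s.toList.getD 0 ' ' = c0 := by rw [hs]; rfl
    rw [hd, hg, hs, List.foldl_cons,
      stepB_eq_of_ne 0 0 none c0 (by simp)]
    have := main_inv rest c0 [c0] 0
    simpa [triSum_two] using this
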